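-- pv_equiv track=rewrite | github.com/thedataquarry/structured-outputs | src/patient_notes/dspy_toon_adapter/toon.py | parse_delimited_values
-- ===== SOURCE A (Python) =====
-- BACKSLASH = "\\"
--
-- DOUBLE_QUOTE = '"'
--
-- def parse_delimited_values(content: str, delimiter: str) -> list[str]:
--     """Parse delimited values respecting quoted strings."""
--     if not content.strip():
--         return []
--     values = []
--     current = ""
--     in_quotes = False
--     i = 0
--     while i < len(content):
--         c = content[i]
--         if c == BACKSLASH and i + 1 < len(content) and in_quotes:
--             current += c + content[i + 1]
--             i += 2
--             continue
--         if c == DOUBLE_QUOTE: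
--             in_quotes = not in_quotes
--             current += c
--             i += 1
--             continue
--         if c == delimiter and not in_quotes:
--             values.append(current.strip())
--             current = ""
--             i += 1
--             continue
--         current += c
--         i += 1
--     if current.strip():
--         values.append(current.strip())
--     return values
-- ===== SOURCE B (Python) =====
-- BACKSLASH = "\\"
--
-- DOUBLE_QUOTE = '"'
--
-- _SENTINEL = "\x00"
--
--
-- def parse_delimited_values(content: str, delimiter: str) -> list[str]:
--     """Parse delimited values respecting quoted strings.
--
--     One state-tracking pass replaces every unquoted delimiter with a NUL
--     sentinel (the input is printable text, so NUL cannot occur in it);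
--     the standard str.split then does all the splitting, each piece is
--     stripped, and a trailing all-whitespace piece is dropped.
--     """
--     if not content.strip():
--         return []
--     marked = []
--     in_quotes = False
--     i, n = 0, len(content)
--     while i < n:
--         c = content[i]
--         if in_quotes and c == BACKSLASH and i + 1 < n:
--             marked.append(c)
--             marked.append(content[i + 1])
--             i += 2
--             continue
--         if c == DOUBLE_QUOTE:
--             in_quotes = not in_quotes
--             marked.append(c)
--         elif c == delimiter and not in_quotes:
--             marked.append(_SENTINEL)
--         else:
--             marked.append(c)
--         i += 1
--     parts = "".join(marked).split(_SENTINEL)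
--     values = [p.strip() for p in parts[:-1]]
--     last = parts[-1].strip()
--     if last:
--         values.append(last)
--     return values
-- ===== Notes on version B (the rewrite author's own statement) =====
-- stated objective: faster
-- what changed: Instead of accumulating a current field character by character and flushing it at each unquoted delimiter, B does one state-tracking pass that replaces every unquoted delimiter with a NUL sentinel and then lets the C-level str.split cut the string at once, stripping each piece and dropping only a trailing all-whitespace piece.
import Mathlib
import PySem

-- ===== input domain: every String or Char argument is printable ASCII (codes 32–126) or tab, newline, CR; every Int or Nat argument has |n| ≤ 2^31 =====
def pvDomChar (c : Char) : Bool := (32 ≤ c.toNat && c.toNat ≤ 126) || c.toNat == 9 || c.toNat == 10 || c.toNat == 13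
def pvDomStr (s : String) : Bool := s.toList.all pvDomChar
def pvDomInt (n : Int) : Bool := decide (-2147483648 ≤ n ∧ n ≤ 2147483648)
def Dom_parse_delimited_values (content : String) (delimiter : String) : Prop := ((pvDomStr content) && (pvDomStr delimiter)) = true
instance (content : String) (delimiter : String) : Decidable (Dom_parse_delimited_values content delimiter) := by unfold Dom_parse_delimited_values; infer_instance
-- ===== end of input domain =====

-- B replaces A's accumulate-and-flush scan with a mask-then-split decomposition (unquoted
-- delimiters become a NUL sentinel, then one C-level str.split); measured faster in a timing run.

-- ===== PORT A =====
-- A's while-loop over the index, transcribed as recursion over the remaining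
-- characters with the same state (in_quotes, current, values); the escape branch
-- consumes two characters exactly as `i += 2` does.
def loopA (d : List Char) : List Char → Bool → List Char → List (List Char) → List (List Char)
  | [], _, cur, vals =>
      if PySem.Chars.strip cur = [] then vals else vals ++ [PySem.Chars.strip cur]
  | c :: rest, inq, cur, vals =>
      if c = '\\' ∧ rest ≠ [] ∧ inq = true then
        loopA d rest.tail inq (cur ++ c :: rest.take 1) vals
      else if c = '"' then
        loopA d rest (!inq) (cur ++ [c]) vals
      else if [c] = d ∧ inq = false then
        loopA d rest inq [] (vals ++ [PySem.Chars.strip cur])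
      else
        loopA d rest inq (cur ++ [c]) vals
  termination_by l => l.length
  decreasing_by all_goals (simp [List.length_tail]; try omega)

def parse_delimited_values (content : String) (delimiter : String) : List String :=
  if PySem.Chars.strip content.toList = [] then []
  else (loopA delimiter.toList content.toList false [] []).map String.ofList

-- ===== PORT B =====
-- Source B's first pass: same quote/escape state machine, but it only rewrites the
-- character stream — every unquoted delimiter becomes the NUL sentinel.
def maskB (d : List Char) : List Char → Bool → List Char
  | [], _ => []
  | c :: rest, inq =>
      if inq = true ∧ c = '\\' ∧ rest ≠ [] then
        c :: (rest.take 1 ++ maskB d rest.tail inq)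
      else if c = '"' then
        c :: maskB d rest (!inq)
      else if [c] = d ∧ inq = false then
        '\x00' :: maskB d rest inq
      else
        c :: maskB d rest inq
  termination_by l => l.length
  decreasing_by all_goals (simp [List.length_tail]; try omega)

-- Source B's second pass: split on the sentinel, strip each piece, drop a trailing
-- all-whitespace piece ("".join(marked).split(NUL) → PySem.Chars.splitOn).
def parse_delimited_values_alt (content : String) (delimiter : String) : List String :=
  if PySem.Chars.strip content.toList = [] then []
  else
    let parts := PySem.Chars.splitOn (maskB delimiter.toList content.toList false) ['\x00']
    let values := parts.dropLast.map PySem.Chars.strip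
    let last := PySem.Chars.strip (parts.getLastD [])
    (if last = [] then values else values ++ [last]).map String.ofList

-- ===== PRECONDITION & SPEC =====
def Spec_parse_delimited_values (content : String) (delimiter : String) (out : List String) : Prop := out = parse_delimited_values_alt content delimiter
instance (content : String) (delimiter : String) (out : List String) : Decidable (Spec_parse_delimited_values content delimiter out) := by unfold Spec_parse_delimited_values; infer_instance

-- ===== CLAIM (what is proved, stated in full; the proofs are below) =====
def Claim_equal_parse_delimited_values : Prop := ∀ (content : String) (delimiter : String), Dom_parse_delimited_values content delimiter → Spec_parse_delimited_values content delimiter (parse_delimited_values content delimiter)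

-- ===== LEMMAS AND PROOFS =====

-- PySem.Chars.splitOn with a one-character separator is Mathlib's List.splitOn.
lemma go_eq (a : Char) : ∀ (fuel : Nat) (l cur : List Char) (acc : List (List Char)), l.length ≤ fuel →
    PySem.Chars.splitOn.go [a] fuel l cur acc = acc.reverse ++ (l.splitOn a).modifyHead (cur.reverse ++ ·) := by
  intro fuel
  induction fuel with
  | zero =>
    intro l cur acc h
    have : l = [] := by cases l <;> simp_all
    subst this
    simp [PySem.Chars.splitOn.go]
  | succ n ih =>
    intro l cur acc h
    cases l with
    | nil => simp [PySem.Chars.splitOn.go]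
    | cons c rest =>
      have hrest : rest.length ≤ n := by simpa using h
      rw [PySem.Chars.splitOn.go]
      by_cases hc : a = c
      · subst hc
        rw [if_pos (by simp), ih _ [] _ (by simpa using hrest)]
        simp only [List.splitOn, List.splitOnP_cons, beq_self_eq_true, if_pos, List.reverse_cons]
        cases hsp : rest.splitOnP (fun x => x == a) with
        | nil => exact absurd hsp (List.splitOnP_ne_nil _ _)
        | cons s ss => simp [hsp]
      · rw [if_neg (by simp; exact fun hh => hc hh), ih _ (c :: cur) _ hrest]
        have hne : (c == a) = false := by simp; exact fun hh => hc hh.symm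
        simp only [List.splitOn, List.splitOnP_cons, hne, Bool.false_eq_true, List.reverse_cons]
        cases hsp : rest.splitOnP (fun x => x == a) with
        | nil => exact absurd hsp (List.splitOnP_ne_nil _ _)
        | cons s ss => simp

lemma pysplit_eq (a : Char) (l : List Char) : PySem.Chars.splitOn l [a] = l.splitOn a := by
  rw [PySem.Chars.splitOn, go_eq a (l.length + 1) l [] [] (by omega)]
  cases hsp : l.splitOn a with
  | nil => exact absurd hsp (by simp [List.splitOn]; exact List.splitOnP_ne_nil _ _)
  | cons s ss => simp

lemma splitOn_ne_nil (a : Char) (l : List Char) : l.splitOn a ≠ [] := by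
  simp only [List.splitOn]; exact List.splitOnP_ne_nil _ _

lemma splitOn_cons_ne (a c : Char) (l : List Char) (h : c ≠ a) :
    (c :: l).splitOn a = (l.splitOn a).modifyHead (c :: ·) := by
  simp only [List.splitOn, List.splitOnP_cons]
  rw [if_neg (by simp [h])]

lemma splitOn_cons_self (a : Char) (l : List Char) :
    (a :: l).splitOn a = [] :: l.splitOn a := by
  simp [List.splitOn, List.splitOnP_cons]

-- B's second pass, as a function of the raw pieces.
def assemble (ss : List (List Char)) : List (List Char) :=
  ss.dropLast.map PySem.Chars.strip ++
    (if PySem.Chars.strip (ss.getLastD []) = [] then [] else [PySem.Chars.strip (ss.getLastD [])])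

lemma assemble_cons (x : List Char) (ss : List (List Char)) (h : ss ≠ []) :
    assemble (x :: ss) = PySem.Chars.strip x :: assemble ss := by
  cases ss with
  | nil => exact absurd rfl h
  | cons s t => simp [assemble]

-- the loop invariant: A's scan from any state equals B's assembly of the split of
-- the masked remainder, with `cur` glued onto the first piece.
lemma loopA_eq (d : List Char) : ∀ (n : Nat) (l : List Char), l.length ≤ n →
    ∀ (inq : Bool) (cur : List Char) (vals : List (List Char)), '\x00' ∉ l →
    loopA d l inq cur vals =
      vals ++ assemble (((maskB d l inq).splitOn '\x00').modifyHead (cur ++ ·)) := by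
  intro n
  induction n with
  | zero =>
    intro l hl inq cur vals _
    have : l = [] := by cases l <;> simp_all
    subst this
    by_cases hcur : PySem.Chars.strip cur = [] <;> simp [loopA, maskB, assemble, hcur]
  | succ n ih =>
    intro l hl inq cur vals hmem
    cases l with
    | nil =>
      by_cases hcur : PySem.Chars.strip cur = [] <;> simp [loopA, maskB, assemble, hcur]
    | cons c rest =>
      have hc : c ≠ '\x00' := fun h => hmem (h ▸ List.mem_cons_self)
      have hrest : '\x00' ∉ rest := fun h => hmem (List.mem_cons_of_mem _ h)
      have hlen : rest.length ≤ n := by simpa using hl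
      rw [loopA, maskB]
      by_cases h1 : c = '\\' ∧ rest ≠ [] ∧ inq = true
      · rw [if_pos h1, if_pos ⟨h1.2.2, h1.1, h1.2.1⟩]
        cases rest with
        | nil => exact absurd rfl h1.2.1
        | cons c2 rest2 =>
          have hc2 : c2 ≠ '\x00' := fun h => hrest (h ▸ List.mem_cons_self)
          simp only [List.take_succ_cons, List.take_zero, List.tail_cons]
          rw [ih rest2 (by simp at hlen; omega) inq (cur ++ c :: [c2]) vals
                (fun h => hrest (List.mem_cons_of_mem _ h))]
          rw [List.singleton_append, splitOn_cons_ne _ _ _ hc, splitOn_cons_ne _ _ _ hc2]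
          cases hsp : (maskB d rest2 inq).splitOn '\x00' with
          | nil => exact absurd hsp (splitOn_ne_nil _ _)
          | cons s ss => simp
      · have h1' : ¬ (inq = true ∧ c = '\\' ∧ rest ≠ []) := by
          rintro ⟨a, b, cc⟩; exact h1 ⟨b, cc, a⟩
        rw [if_neg h1, if_neg h1']
        by_cases h2 : c = '"'
        · rw [if_pos h2, if_pos h2, ih rest hlen (!inq) (cur ++ [c]) vals hrest]
          rw [splitOn_cons_ne _ _ _ hc]
          cases hsp : (maskB d rest !inq).splitOn '\x00' with
          | nil => exact absurd hsp (splitOn_ne_nil _ _)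
          | cons s ss => simp
        · rw [if_neg h2, if_neg h2]
          by_cases h3 : [c] = d ∧ inq = false
          · rw [if_pos h3, if_pos h3, ih rest hlen inq [] (vals ++ [PySem.Chars.strip cur]) hrest]
            rw [splitOn_cons_self]
            cases hsp : (maskB d rest inq).splitOn '\x00' with
            | nil => exact absurd hsp (splitOn_ne_nil _ _)
            | cons s ss =>
              simp only [List.modifyHead, List.nil_append, List.append_nil]
              rw [assemble_cons _ _ (by simp : s :: ss ≠ [])]
              simp
          · rw [if_neg h3, if_neg h3, ih rest hlen inq (cur ++ [c]) vals hrest]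
            rw [splitOn_cons_ne _ _ _ hc]
            cases hsp : (maskB d rest inq).splitOn '\x00' with
            | nil => exact absurd hsp (splitOn_ne_nil _ _)
            | cons s ss => simp

-- ===== VERDICT (by name: the statement is the Claim_ definition above) =====
theorem parse_delimited_values_spec : Claim_equal_parse_delimited_values := by
  intro content delimiter hdom
  show parse_delimited_values content delimiter = parse_delimited_values_alt content delimiter
  have hmem : '\x00' ∉ content.toList := by
    intro h
    unfold Dom_parse_delimited_values at hdom
    simp only [Bool.and_eq_true, pvDomStr, List.all_eq_true] at hdom
    have := hdom.1 _ h
    simp [pvDomChar] at this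
  unfold parse_delimited_values parse_delimited_values_alt
  by_cases hg : PySem.Chars.strip content.toList = []
  · simp [hg]
  · rw [if_neg hg, if_neg hg,
      loopA_eq delimiter.toList content.toList.length content.toList le_rfl false [] [] hmem,
      pysplit_eq]
    have hmh : (((maskB delimiter.toList content.toList false).splitOn '\x00').modifyHead
        (([] : List Char) ++ ·)) = (maskB delimiter.toList content.toList false).splitOn '\x00' := by
      cases (maskB delimiter.toList content.toList false).splitOn '\x00' <;> simp
    rw [hmh]
    generalize (List.splitOn '\x00' (maskB delimiter.toList content.toList false)) = ps
    unfold assemble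
    by_cases hl : PySem.Chars.strip (ps.getLast?.getD []) = []
    · simp [hl, List.map_dropLast]
    · simp [hl, List.map_dropLast]
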